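-- pv_equiv track=rewrite | github.com/j0s/aoc2020 | 14/solution_2.py | parse_mask
-- ===== SOURCE A (Python) =====
-- from typing import IO, Any, List, Optional, Dict, Iterable, Tuple
--
-- def parse_mask(mask: str) -> Tuple[int, List[int]]:
--     pos, floating = 0, []
--     for i, char in enumerate(reversed(mask)):
--         if char == "1":
--             pos += 2 ** i
--         elif char == "X":
--             floating.append(i)
--
--     return pos, floating
-- ===== SOURCE B (Python) =====
-- def parse_mask(mask):
--     # Forward Horner scan: pos = pos*2 + bit per char; floating collected
--     # as distance-from-right during the same forward pass, then reversed
--     # so positions come out ascending.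
--     pos = 0
--     floating = []
--     n = len(mask)
--     for i, char in enumerate(mask):
--         pos = pos * 2 + (1 if char == "1" else 0)
--         if char == "X":
--             floating.append(n - 1 - i)
--     return pos, list(reversed(floating))
-- ===== Notes on version B (the rewrite author's own statement) =====
-- stated objective: alternative
-- what changed: B scans the mask forward once with a Horner accumulator (pos = pos*2 + bit) instead of A's reversed-enumerate loop adding 2**i per set bit, and collects floating positions as n-1-i during the forward pass, reversing once at the end.
import Mathlib
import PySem

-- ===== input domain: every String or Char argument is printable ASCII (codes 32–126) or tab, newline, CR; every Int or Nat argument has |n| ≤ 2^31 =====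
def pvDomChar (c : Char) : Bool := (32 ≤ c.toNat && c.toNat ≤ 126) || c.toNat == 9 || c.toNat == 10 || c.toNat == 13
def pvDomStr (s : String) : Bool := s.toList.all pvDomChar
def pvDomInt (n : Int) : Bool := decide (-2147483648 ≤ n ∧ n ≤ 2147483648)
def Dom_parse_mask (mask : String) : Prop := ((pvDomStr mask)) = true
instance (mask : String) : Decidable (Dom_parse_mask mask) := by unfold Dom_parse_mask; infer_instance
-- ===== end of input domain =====

-- B replaces A's reversed-enumerate loop (pos += 2**i per '1') by a single forward
-- Horner scan (pos = pos*2 + bit), collecting floating positions as n-1-i and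
-- reversing once at the end; alternative decomposition, same O(n) cost.

-- ===== PORT A =====
def parse_mask (mask : String) : Int × List Int :=
  (PySem.List.enumerate mask.toList.reverse 0).foldl
    (fun acc p =>
      if p.2 == '1' then (acc.1 + 2 ^ p.1.toNat, acc.2)
      else if p.2 == 'X' then (acc.1, acc.2 ++ [p.1])
      else acc)
    (0, [])

-- ===== PORT B =====
def parse_mask_alt (mask : String) : Int × List Int :=
  let n : Int := mask.toList.length
  let r := (PySem.List.enumerate mask.toList 0).foldl
    (fun acc p =>
      (acc.1 * 2 + (if p.2 == '1' then (1 : Int) else 0),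
       if p.2 == 'X' then acc.2 ++ [n - 1 - p.1] else acc.2))
    ((0 : Int), ([] : List Int))
  (r.1, r.2.reverse)

-- ===== PRECONDITION & SPEC =====
def Spec_parse_mask (mask : String) (out : Int × List Int) : Prop := out = parse_mask_alt mask
instance (mask : String) (out : Int × List Int) : Decidable (Spec_parse_mask mask out) := by unfold Spec_parse_mask; infer_instance

-- ===== CLAIM (what is proved, stated in full; the proofs are below) =====
def Claim_equal_parse_mask : Prop := ∀ (mask : String), Dom_parse_mask mask → Spec_parse_mask mask (parse_mask mask)

-- ===== LEMMAS AND PROOFS =====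

-- 2^i contributed by a '1' at (reversed) index i
def pvBitPow (p : Int × Char) : Int := if p.2 == '1' then 2 ^ p.1.toNat else 0

-- A's step written with independent components
theorem pvStepA_eq :
    (fun (acc : Int × List Int) (p : Int × Char) =>
      if p.2 == '1' then (acc.1 + 2 ^ p.1.toNat, acc.2)
      else if p.2 == 'X' then (acc.1, acc.2 ++ [p.1])
      else acc)
    = (fun acc p =>
      ((fun (a : Int) (p : Int × Char) => if p.2 == '1' then a + 2 ^ p.1.toNat else a) acc.1 p,
       (fun (a : List Int) (p : Int × Char) => if p.2 == 'X' then a ++ [p.1] else a) acc.2 p)) := by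
  funext acc p
  by_cases h1 : p.2 = '1' <;> by_cases hx : p.2 = 'X' <;> simp [h1, hx]

-- floating lists: forward collection (values c - index), reversed, equals the
-- reversed-enumerate collection of raw indices
theorem pvFloat_rev (t : List Char) (c : Int) : ∀ (s : Int),
    ((((PySem.List.enumerate t s).filter (fun p => p.2 == 'X')).map (fun p => c - p.1)).reverse)
      = (((PySem.List.enumerate t.reverse (c - s - ((t.length : Int) - 1))).filter
          (fun p => p.2 == 'X')).map Prod.fst) := by
  induction t with
  | nil => intro s; simp [PySem.List.enumerate_nil]
  | cons a t ih =>
    intro s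
    rw [PySem.List.enumerate_cons]
    rw [show (a :: t).reverse = t.reverse ++ [a] by simp]
    rw [PySem.List.enumerate_append, List.filter_append, List.map_append]
    rw [PySem.List.enumerate_cons, PySem.List.enumerate_nil]
    have e1 : c - s - ((((a :: t)).length : Int) - 1) = c - (s + 1) - ((t.length : Int) - 1) := by
      simp only [List.length_cons]; push_cast; ring
    have e2 : c - (s + 1) - ((t.length : Int) - 1) + (t.reverse.length : Int) = c - s := by
      push_cast [List.length_reverse]; ring
    rw [e1, e2, ← ih (s + 1)]
    by_cases hx : a = 'X' <;> simp [hx]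

-- Horner fold over the chars equals acc * 2^len + the bit-power sum over the reversed enumerate
theorem pvHorner (l : List Char) (acc : Int) :
    l.foldl (fun a ch => a * 2 + (if ch == '1' then (1 : Int) else 0)) acc
      = acc * 2 ^ l.length + ((PySem.List.enumerate l.reverse 0).map pvBitPow).sum := by
  induction l generalizing acc with
  | nil => simp [PySem.List.enumerate_nil]
  | cons a t ih =>
    rw [List.foldl_cons, ih]
    rw [show (a :: t).reverse = t.reverse ++ [a] by simp]
    rw [PySem.List.enumerate_append, PySem.List.enumerate_cons, PySem.List.enumerate_nil,
      List.map_append, List.sum_append]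
    have : pvBitPow ((0 : Int) + (t.reverse.length : Int), a)
        = (if a == '1' then (1 : Int) else 0) * 2 ^ t.length := by
      simp only [pvBitPow]
      by_cases h : a = '1' <;> simp [h]
    simp only [List.map_cons, List.map_nil, List.sum_cons, List.sum_nil, this, List.length_cons]
    ring

-- the forward fold of B ignores indices in its first component
theorem pvB_fst (l : List Char) : ∀ (s acc : Int),
    (PySem.List.enumerate l s).foldl
        (fun (a : Int) (p : Int × Char) => a * 2 + (if p.2 == '1' then (1 : Int) else 0)) acc
      = l.foldl (fun a ch => a * 2 + (if ch == '1' then (1 : Int) else 0)) acc := by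
  induction l with
  | nil => intro s acc; simp [PySem.List.enumerate_nil]
  | cons a t ih =>
    intro s acc
    rw [PySem.List.enumerate_cons, List.foldl_cons, List.foldl_cons, ih]

-- ===== VERDICT (by name: the statement is the Claim_ definition above) =====
theorem parse_mask_spec : Claim_equal_parse_mask := by
  intro mask _
  show parse_mask mask = parse_mask_alt mask
  simp only [parse_mask, parse_mask_alt]
  rw [pvStepA_eq, PySem.List.foldl_prod_mk
      (f := fun (a : Int) (p : Int × Char) => if p.2 == '1' then a + 2 ^ p.1.toNat else a)
      (g := fun (a : List Int) (p : Int × Char) => if p.2 == 'X' then a ++ [p.1] else a)]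
  rw [PySem.List.foldl_prod_mk
      (f := fun (a : Int) (p : Int × Char) => a * 2 + (if p.2 == '1' then (1 : Int) else 0))
      (g := fun (a : List Int) (p : Int × Char) =>
        if p.2 == 'X' then a ++ [(mask.toList.length : Int) - 1 - p.1] else a)]
  refine Prod.ext ?_ ?_
  · -- pos
    show (PySem.List.enumerate mask.toList.reverse 0).foldl
        (fun a p => if p.2 == '1' then a + 2 ^ p.1.toNat else a) 0 = _
    have hA : (PySem.List.enumerate mask.toList.reverse 0).foldl
        (fun (a : Int) p => if p.2 == '1' then a + 2 ^ p.1.toNat else a) 0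
        = 0 + ((PySem.List.enumerate mask.toList.reverse 0).map pvBitPow).sum := by
      rw [← PySem.List.foldl_add (g := pvBitPow)]
      apply PySem.List.foldl_congr_mem
      intro a p _
      by_cases h : p.2 = '1' <;> simp [h, pvBitPow]
    rw [hA, pvB_fst, pvHorner]
    ring
  · -- floating
    show ((PySem.List.enumerate mask.toList.reverse 0).foldl
        (fun (a : List Int) p => if p.2 == 'X' then a ++ [p.1] else a) []) = _
    rw [PySem.List.foldl_append_if (p := fun p : Int × Char => p.2 == 'X') (f := Prod.fst),
      PySem.List.foldl_append_if (p := fun p : Int × Char => p.2 == 'X')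
        (f := fun p : Int × Char => (mask.toList.length : Int) - 1 - p.1)]
    have h := pvFloat_rev mask.toList ((mask.toList.length : Int) - 1) 0
    simp only [List.nil_append]
    rw [h]
    have e : (mask.toList.length : Int) - 1 - 0 - ((mask.toList.length : Int) - 1) = 0 := by ring
    rw [e]
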